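-- pv_equiv track=rewrite | github.com/paulmcoker/NetSim | exampleMakeGraph.py | calcHighest
-- ===== SOURCE A (Python) =====
-- def calcHighest(ylist):
--     highestY = 0
--     for y in range(len(ylist)):
--         if ylist[y] > highestY:
--             highestY = ylist[y]
--     if highestY < 5000:
--         highestY = 5000 # round up
--     elif highestY < 10000:
--         highestY = 10000 # round up
--     elif highestY < 20000:
--         highestY = 20000 # round up
--     elif highestY < 50000:
--         highestY = 50000 # round up
--     elif highestY < 100000:
--         highestY = 100000 # round up
--     elif highestY < 500000:
--         highestY = 500000 # round up
--     elif highestY < 1000000: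
--         highestY = 1000000 # round up
--     else:
--         highestY = 10000000
--
--     return highestY
-- ===== SOURCE B (Python) =====
-- _NEXT = {5000: 10000, 10000: 20000, 20000: 50000, 50000: 100000,
--          100000: 500000, 500000: 1000000, 1000000: 10000000}
--
-- def calcHighest(ylist):
--     # single pass: keep the rounded-up bucket itself as the loop state and
--     # promote it along the successor chain whenever an element reaches it
--     bucket = 5000
--     for y in ylist:
--         while y >= bucket and bucket != 10000000:
--             bucket = _NEXT[bucket]
--     return bucket
-- ===== Notes on version B (the rewrite author's own statement) =====
-- stated objective: alternative
-- what changed: Instead of first computing the maximum and then classifying it through a seven-branch elif cascade, B keeps the rounded-up bucket itself as the single-pass loop state, promoting it along a successor chain (a dict mapping each bucket to the next) whenever an element reaches the current bucket; no maximum is ever computed and no cascade is evaluated.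
import Mathlib
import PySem

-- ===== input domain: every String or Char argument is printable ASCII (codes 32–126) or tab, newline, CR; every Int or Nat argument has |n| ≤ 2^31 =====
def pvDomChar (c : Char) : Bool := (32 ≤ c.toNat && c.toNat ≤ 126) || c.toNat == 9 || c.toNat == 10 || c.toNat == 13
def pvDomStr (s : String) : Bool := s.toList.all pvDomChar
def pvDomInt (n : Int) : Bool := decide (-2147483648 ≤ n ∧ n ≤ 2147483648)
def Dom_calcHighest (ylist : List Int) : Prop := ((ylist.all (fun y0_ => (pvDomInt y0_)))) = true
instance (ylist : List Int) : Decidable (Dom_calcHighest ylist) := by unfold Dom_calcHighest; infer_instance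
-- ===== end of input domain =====

-- B keeps the rounded-up bucket itself as the single-pass loop state, promoting it along a
-- successor chain whenever an element reaches it; no maximum, no elif cascade (alternative).

-- ===== PORT A =====
def calcHighest (ylist : List Int) : Int :=
  -- highestY = 0; for y in range(len(ylist)): if ylist[y] > highestY: highestY = ylist[y]
  let highestY : Int :=
    (PySem.List.pyRange 0 ylist.length 1).foldl
      (fun h y => match PySem.List.pyGet? ylist y with
        | some v => if v > h then v else h
        | none => h) 0
  if highestY < 5000 then 5000
  else if highestY < 10000 then 10000
  else if highestY < 20000 then 20000
  else if highestY < 50000 then 50000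
  else if highestY < 100000 then 100000
  else if highestY < 500000 then 500000
  else if highestY < 1000000 then 1000000
  else 10000000

-- ===== PORT B =====
-- _NEXT: the successor chain of buckets
def pvNext : PySem.Dict Int Int :=
  PySem.Dict.ofList [(5000, 10000), (10000, 20000), (20000, 50000), (50000, 100000),
   (100000, 500000), (500000, 1000000), (1000000, 10000000)]

-- the inner 'while y >= bucket and bucket != 10000000' loop; the fuel argument (8 at the call
-- site) only makes the loop total in Lean: starting from 5000 the successor chain has 7 links,
-- so the Python while loop runs at most 7 iterations and the fuel is never exhausted
def pvPromote (y b : Int) : Nat → Int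
  | 0 => b
  | Nat.succ f => if y ≥ b ∧ b ≠ 10000000 then pvPromote y (pvNext.getD b 0) f else b

def calcHighest_alt (ylist : List Int) : Int :=
  -- bucket = 5000; for y in ylist: while y >= bucket and bucket != 10000000: bucket = _NEXT[bucket]
  ylist.foldl (fun bucket y => pvPromote y bucket 8) 5000

-- ===== PRECONDITION & SPEC =====
def Spec_calcHighest (ylist : List Int) (out : Int) : Prop := out = calcHighest_alt ylist
instance (ylist : List Int) (out : Int) : Decidable (Spec_calcHighest ylist out) := by
  unfold Spec_calcHighest; infer_instance

-- ===== CLAIM =====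
def Claim_equal_calcHighest : Prop :=
  ∀ (ylist : List Int), Dom_calcHighest ylist → Spec_calcHighest ylist (calcHighest ylist)

-- ===== LEMMAS AND PROOFS =====

-- A's elif cascade, as a function of the maximum (proof-only helper)
def pvBucketOf (m : Int) : Int :=
  if m < 5000 then 5000
  else if m < 10000 then 10000
  else if m < 20000 then 20000
  else if m < 50000 then 50000
  else if m < 100000 then 100000
  else if m < 500000 then 500000
  else if m < 1000000 then 1000000
  else 10000000

theorem pvP0 (y b : Int) : pvPromote y b 0 = b := rfl
theorem pvPsucc (y b : Int) (f : Nat) :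
    pvPromote y b (f+1) = if y ≥ b ∧ b ≠ 10000000 then pvPromote y (pvNext.getD b 0) f else b := rfl

-- A's indexed loop is the running max over the elements, started at 0.
theorem pvAfold_eq (ylist : List Int) :
    (PySem.List.pyRange 0 ylist.length 1).foldl
      (fun h y => match PySem.List.pyGet? ylist y with
        | some v => if v > h then v else h
        | none => h) 0 = ylist.foldl max 0 := by
  have h1 := PySem.List.foldl_congr_mem (PySem.List.pyRange 0 (ylist.length : Int))
      (fun h y => match PySem.List.pyGet? ylist y with
        | some v => if v > h then v else h
        | none => h)
      (fun h y => max h (PySem.List.pyGetD ylist y 0)) 0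
      (by intro acc x hx
          rcases (PySem.List.mem_pyRange_one).1 hx with ⟨h0, hlt⟩
          show (match PySem.List.pyGet? ylist x with
            | some v => if v > acc then v else acc
            | none => acc) = max acc (PySem.List.pyGetD ylist x 0)
          simp only [PySem.List.pyGet?_eq_some_getElem ylist h0 hlt,
            PySem.List.pyGetD_eq_getElem ylist 0 h0 hlt]
          rw [max_def]; split_ifs <;> omega)
  rw [h1, PySem.List.foldl_pyRange_zero_pyGetD' ylist 0 (fun h v => max h v) 0]

-- pvBucketOf never exceeds the top bucket
theorem pvB_le_top (y : Int) : pvBucketOf y ≤ 10000000 := by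
  simp only [pvBucketOf]; split_ifs <;> omega

-- promoting from the top bucket does nothing, for any fuel
theorem pvProm_top (y : Int) (f : Nat) : pvPromote y 10000000 f = max 10000000 (pvBucketOf y) := by
  have h := pvB_le_top y
  cases f with
  | zero => rw [pvP0, max_def]; split_ifs with h1 <;> omega
  | succ f => rw [pvPsucc, if_neg (fun hc => hc.2 rfl), max_def]; split_ifs <;> omega

-- one link of the successor chain
theorem pvChain (y b b' : Int) (f : Nat)
    (hnext : pvNext.getD b 0 = b') (hne : b ≠ 10000000)
    (hlow : y < b → pvBucketOf y ≤ b)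
    (hhigh : b ≤ y → b ≤ b' ∧ b' ≤ pvBucketOf y)
    (ih : pvPromote y b' f = max b' (pvBucketOf y)) :
    pvPromote y b (f + 1) = max b (pvBucketOf y) := by
  rw [pvPsucc, hnext]
  by_cases h : b ≤ y
  · rw [if_pos ⟨h, hne⟩, ih]
    have := hhigh h
    rw [max_def, max_def]; split_ifs <;> omega
  · rw [if_neg (fun hc => h hc.1)]
    have := hlow (by omega)
    rw [max_def]; split_ifs <;> omega

theorem pvProm_1000000 (y : Int) (f : Nat) : pvPromote y 1000000 (f + 1) = max 1000000 (pvBucketOf y) := by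
  rw [show f + 1 = (f) + 1 from by omega]
  exact pvChain y 1000000 10000000 (f) (by decide) (by decide)
    (fun h => by simp only [pvBucketOf]; split_ifs <;> omega)
    (fun h => by refine ⟨by omega, ?_⟩; simp only [pvBucketOf]; split_ifs <;> omega)
    (pvProm_top y f)

theorem pvProm_500000 (y : Int) (f : Nat) : pvPromote y 500000 (f + 2) = max 500000 (pvBucketOf y) := by
  rw [show f + 2 = (f + 1) + 1 from by omega]
  exact pvChain y 500000 1000000 (f + 1) (by decide) (by decide)
    (fun h => by simp only [pvBucketOf]; split_ifs <;> omega)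
    (fun h => by refine ⟨by omega, ?_⟩; simp only [pvBucketOf]; split_ifs <;> omega)
    (pvProm_1000000 y f)

theorem pvProm_100000 (y : Int) (f : Nat) : pvPromote y 100000 (f + 3) = max 100000 (pvBucketOf y) := by
  rw [show f + 3 = (f + 2) + 1 from by omega]
  exact pvChain y 100000 500000 (f + 2) (by decide) (by decide)
    (fun h => by simp only [pvBucketOf]; split_ifs <;> omega)
    (fun h => by refine ⟨by omega, ?_⟩; simp only [pvBucketOf]; split_ifs <;> omega)
    (pvProm_500000 y f)

theorem pvProm_50000 (y : Int) (f : Nat) : pvPromote y 50000 (f + 4) = max 50000 (pvBucketOf y) := by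
  rw [show f + 4 = (f + 3) + 1 from by omega]
  exact pvChain y 50000 100000 (f + 3) (by decide) (by decide)
    (fun h => by simp only [pvBucketOf]; split_ifs <;> omega)
    (fun h => by refine ⟨by omega, ?_⟩; simp only [pvBucketOf]; split_ifs <;> omega)
    (pvProm_100000 y f)

theorem pvProm_20000 (y : Int) (f : Nat) : pvPromote y 20000 (f + 5) = max 20000 (pvBucketOf y) := by
  rw [show f + 5 = (f + 4) + 1 from by omega]
  exact pvChain y 20000 50000 (f + 4) (by decide) (by decide)
    (fun h => by simp only [pvBucketOf]; split_ifs <;> omega)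
    (fun h => by refine ⟨by omega, ?_⟩; simp only [pvBucketOf]; split_ifs <;> omega)
    (pvProm_50000 y f)

theorem pvProm_10000 (y : Int) (f : Nat) : pvPromote y 10000 (f + 6) = max 10000 (pvBucketOf y) := by
  rw [show f + 6 = (f + 5) + 1 from by omega]
  exact pvChain y 10000 20000 (f + 5) (by decide) (by decide)
    (fun h => by simp only [pvBucketOf]; split_ifs <;> omega)
    (fun h => by refine ⟨by omega, ?_⟩; simp only [pvBucketOf]; split_ifs <;> omega)
    (pvProm_20000 y f)

theorem pvProm_5000 (y : Int) (f : Nat) : pvPromote y 5000 (f + 7) = max 5000 (pvBucketOf y) := by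
  rw [show f + 7 = (f + 6) + 1 from by omega]
  exact pvChain y 5000 10000 (f + 6) (by decide) (by decide)
    (fun h => by simp only [pvBucketOf]; split_ifs <;> omega)
    (fun h => by refine ⟨by omega, ?_⟩; simp only [pvBucketOf]; split_ifs <;> omega)
    (pvProm_10000 y f)


-- the bucket function is monotone, hence commutes with max
theorem pvB_mono (a b : Int) (h : a ≤ b) : pvBucketOf a ≤ pvBucketOf b := by
  simp only [pvBucketOf]; split_ifs <;> omega

theorem pvB_max (a b : Int) : pvBucketOf (max a b) = max (pvBucketOf a) (pvBucketOf b) := by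
  rcases le_total a b with h | h
  · rw [max_eq_right h, max_eq_right (pvB_mono a b h)]
  · rw [max_eq_left h, max_eq_left (pvB_mono b a h)]

-- one iteration of B's outer loop, started at the bucket of the running max m
theorem pvStep (m y : Int) : pvPromote y (pvBucketOf m) 8 = pvBucketOf (max m y) := by
  rw [pvB_max]
  rcases lt_or_ge m 5000 with h | h
  · rw [show pvBucketOf m = 5000 from by simp only [pvBucketOf]; split_ifs <;> omega]
    exact pvProm_5000 y 1
  rcases lt_or_ge m 10000 with h2 | h2
  · rw [show pvBucketOf m = 10000 from by simp only [pvBucketOf]; split_ifs <;> omega]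
    exact pvProm_10000 y 2
  rcases lt_or_ge m 20000 with h3 | h3
  · rw [show pvBucketOf m = 20000 from by simp only [pvBucketOf]; split_ifs <;> omega]
    exact pvProm_20000 y 3
  rcases lt_or_ge m 50000 with h4 | h4
  · rw [show pvBucketOf m = 50000 from by simp only [pvBucketOf]; split_ifs <;> omega]
    exact pvProm_50000 y 4
  rcases lt_or_ge m 100000 with h5 | h5
  · rw [show pvBucketOf m = 100000 from by simp only [pvBucketOf]; split_ifs <;> omega]
    exact pvProm_100000 y 5
  rcases lt_or_ge m 500000 with h6 | h6
  · rw [show pvBucketOf m = 500000 from by simp only [pvBucketOf]; split_ifs <;> omega]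
    exact pvProm_500000 y 6
  rcases lt_or_ge m 1000000 with h7 | h7
  · rw [show pvBucketOf m = 1000000 from by simp only [pvBucketOf]; split_ifs <;> omega]
    exact pvProm_1000000 y 7
  · rw [show pvBucketOf m = 10000000 from by simp only [pvBucketOf]; split_ifs <;> omega]
    exact pvProm_top y 8

-- loop invariant: B's state is the bucket of the running maximum
theorem pvFold_inv (ys : List Int) (m : Int) :
    ys.foldl (fun bucket y => pvPromote y bucket 8) (pvBucketOf m) = pvBucketOf (ys.foldl max m) := by
  induction ys generalizing m with
  | nil => rfl
  | cons y t ih => simp only [List.foldl_cons, pvStep m y, ih (max m y)]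

-- ===== VERDICT =====
theorem calcHighest_spec : Claim_equal_calcHighest := by
  intro ylist _
  unfold Spec_calcHighest calcHighest calcHighest_alt
  rw [pvAfold_eq]
  conv_rhs => rw [show (5000 : Int) = pvBucketOf 0 from by norm_num [pvBucketOf]]
  rw [pvFold_inv]
  simp only [pvBucketOf]
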